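-- pv_equiv track=rewrite | github.com/Arenia/ChessAI | chessbase.py | distant_range
-- ===== SOURCE A (Python) =====
-- def distant_range(tar_xpos, tar_ypos, field):
--     #use passed target as the location of the piece
--     #returns a list of indicies that can attack a given square next turn (two turns to reach)
--     targets = []
--     for a in range(0,8):
--         for b in range(0,8):
--             if (tar_ypos == b-1):
--                 if (tar_xpos == a) and (len(field[a][b]) == 0):
--                     targets.append([a, b])
--                 elif (((tar_xpos == a+1) or (tar_xpos == a-1)) and (len(field[a][b]) != 0)):
--                     targets.append([a, b])
--     return targets
-- ===== SOURCE B (Python) =====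
-- def distant_range(tar_xpos, tar_ypos, field):
--     # Directly visit the only three candidate columns instead of scanning the 8x8 board.
--     b = tar_ypos + 1
--     if not (0 <= b <= 7):
--         return []
--     targets = []
--     for a in (tar_xpos - 1, tar_xpos, tar_xpos + 1):
--         if not (0 <= a <= 7):
--             continue
--         cell = field[a][b]
--         if a == tar_xpos:
--             if len(cell) == 0:
--                 targets.append([a, b])
--         elif len(cell) != 0:
--             targets.append([a, b])
--     return targets
-- ===== Notes on version B (the rewrite author's own statement) =====
-- stated objective: simpler
-- what changed: Instead of scanning all 64 board squares with nested loops, B computes the single relevant row b = tar_ypos+1, returns [] at once if it is off-board, and visits only the three candidate columns tar_xpos-1, tar_xpos, tar_xpos+1, keeping in-range ones by the empty/non-empty test.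
import Mathlib
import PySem

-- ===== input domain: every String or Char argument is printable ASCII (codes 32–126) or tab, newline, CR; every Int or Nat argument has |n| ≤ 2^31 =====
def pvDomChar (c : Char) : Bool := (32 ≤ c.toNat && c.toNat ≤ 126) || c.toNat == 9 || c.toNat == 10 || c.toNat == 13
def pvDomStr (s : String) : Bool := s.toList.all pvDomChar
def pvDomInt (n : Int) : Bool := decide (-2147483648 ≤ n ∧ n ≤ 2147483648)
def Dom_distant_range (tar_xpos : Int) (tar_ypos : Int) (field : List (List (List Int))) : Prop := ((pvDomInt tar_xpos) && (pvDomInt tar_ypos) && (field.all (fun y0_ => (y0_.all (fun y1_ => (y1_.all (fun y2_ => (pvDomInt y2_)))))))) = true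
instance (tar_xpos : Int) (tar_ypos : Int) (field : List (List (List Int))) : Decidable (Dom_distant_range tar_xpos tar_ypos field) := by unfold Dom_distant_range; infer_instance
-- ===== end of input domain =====

-- B replaces A's full 8x8 board scan by a direct probe of the single row tar_ypos+1 at the three candidate columns (simpler).


-- ===== PORT A =====
-- literal transliteration: nested 'for a in range(0,8): for b in range(0,8)'; field[a][b] via pyGetD (always in range under Pre_)
def distant_range (tar_xpos : Int) (tar_ypos : Int) (field : List (List (List Int))) : List (List Int) :=
  (PySem.List.pyRange 0 8 1).foldl (fun targets a =>
    (PySem.List.pyRange 0 8 1).foldl (fun targets b =>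
      if tar_ypos = b - 1 then
        if tar_xpos = a ∧ (PySem.List.pyGetD (PySem.List.pyGetD field a []) b []).length = 0 then
          targets ++ [[a, b]]
        else if (tar_xpos = a + 1 ∨ tar_xpos = a - 1) ∧ (PySem.List.pyGetD (PySem.List.pyGetD field a []) b []).length ≠ 0 then
          targets ++ [[a, b]]
        else targets
      else targets) targets) []

-- ===== PORT B =====
-- transliteration of Source B: early return on an off-board row, then a loop over the three candidate columns
def distant_range_alt (tar_xpos : Int) (tar_ypos : Int) (field : List (List (List Int))) : List (List Int) :=
  let b := tar_ypos + 1
  if ¬ (0 ≤ b ∧ b ≤ 7) then []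
  else
    [tar_xpos - 1, tar_xpos, tar_xpos + 1].foldl (fun targets a =>
      if ¬ (0 ≤ a ∧ a ≤ 7) then targets
      else
        let cell := PySem.List.pyGetD (PySem.List.pyGetD field a []) b []
        if a = tar_xpos then
          (if cell.length = 0 then targets ++ [[a, b]] else targets)
        else
          (if cell.length ≠ 0 then targets ++ [[a, b]] else targets)) []

-- ===== PRECONDITION & SPEC =====
-- Pre_ excludes exactly the inputs where Python A raises IndexError: when row b = tar_ypos+1 is on the
-- board, A's short-circuiting conditions evaluate field[a][b] exactly for the on-board columns a in
-- {tar_xpos-1, tar_xpos, tar_xpos+1}, so each such a needs a row of length > b.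
def Pre_distant_range (tar_xpos : Int) (tar_ypos : Int) (field : List (List (List Int))) : Prop :=
  (0 ≤ tar_ypos + 1 ∧ tar_ypos + 1 ≤ 7) →
    ∀ a ∈ [tar_xpos - 1, tar_xpos, tar_xpos + 1], (0 ≤ a ∧ a ≤ 7) →
      (a < (field.length : Int) ∧ tar_ypos + 1 < ((PySem.List.pyGetD field a []).length : Int))
instance (tar_xpos : Int) (tar_ypos : Int) (field : List (List (List Int))) : Decidable (Pre_distant_range tar_xpos tar_ypos field) := by unfold Pre_distant_range; infer_instance

def pvWitness_distant_range : Int × Int × List (List (List Int)) :=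
  (3, 2, [[[], [], [], [1], [], [], [], []], [[], [], [], [], [], [], [], []],
          [[], [], [], [2], [], [], [], []], [[], [], [], [], [], [], [], []],
          [[], [], [], [5], [], [], [], []], [[], [], [], [], [], [], [], []],
          [[], [], [], [], [], [], [], []], [[], [], [], [], [], [], [], []]])

def Spec_distant_range (tar_xpos : Int) (tar_ypos : Int) (field : List (List (List Int))) (out : List (List Int)) : Prop := out = distant_range_alt tar_xpos tar_ypos field
instance (tar_xpos : Int) (tar_ypos : Int) (field : List (List (List Int))) (out : List (List Int)) : Decidable (Spec_distant_range tar_xpos tar_ypos field out) := by unfold Spec_distant_range; infer_instance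

-- ===== CLAIM (what is proved, stated in full; the proofs are below) =====
def Claim_equal_distant_range : Prop := ∀ (tar_xpos : Int) (tar_ypos : Int) (field : List (List (List Int))), Dom_distant_range tar_xpos tar_ypos field → Pre_distant_range tar_xpos tar_ypos field → Spec_distant_range tar_xpos tar_ypos field (distant_range tar_xpos tar_ypos field)

-- ===== LEMMAS AND PROOFS =====
-- Bool test 'the cell at [a][b] is empty'
def pvCell (field : List (List (List Int))) (a b : Int) : Bool :=
  (PySem.List.pyGetD (PySem.List.pyGetD field a []) b []).length == 0

-- Bool form of A's append condition at square (a, b)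
def pvPA (x y : Int) (field : List (List (List Int))) (a b : Int) : Bool :=
  decide (y = b - 1) && ((decide (x = a) && pvCell field a b) ||
    ((decide (x = a + 1) || decide (x = a - 1)) && !pvCell field a b))

-- Bool form of B's append condition at column a
def pvPB (x y : Int) (field : List (List (List Int))) (a : Int) : Bool :=
  decide (0 ≤ a ∧ a ≤ 7) && (if a = x then pvCell field a (y + 1) else !pvCell field a (y + 1))

theorem pyRange8 : PySem.List.pyRange 0 8 1 = [0, 1, 2, 3, 4, 5, 6, 7] := by decide

theorem A_shape (x y : Int) (field : List (List (List Int))) :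
    distant_range x y field =
      (PySem.List.pyRange 0 8 1).flatMap (fun a =>
        ((PySem.List.pyRange 0 8 1).filter (pvPA x y field a)).map (fun b => [a, b])) := by
  unfold distant_range
  have hinner : ∀ (a : Int) (acc : List (List Int)),
      (PySem.List.pyRange 0 8 1).foldl (fun targets b =>
        if y = b - 1 then
          if x = a ∧ (PySem.List.pyGetD (PySem.List.pyGetD field a []) b []).length = 0 then
            targets ++ [[a, b]]
          else if (x = a + 1 ∨ x = a - 1) ∧ (PySem.List.pyGetD (PySem.List.pyGetD field a []) b []).length ≠ 0 then
            targets ++ [[a, b]]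
          else targets
        else targets) acc
      = acc ++ ((PySem.List.pyRange 0 8 1).filter (pvPA x y field a)).map (fun b => [a, b]) := by
    intro a acc
    rw [PySem.List.foldl_congr_mem' _ _
      (fun acc b => if pvPA x y field a b then acc ++ [[a, b]] else acc) acc
      (by
        intro b _ acc
        by_cases h1 : y = b - 1 <;>
          by_cases h2 : (PySem.List.pyGetD (PySem.List.pyGetD field a []) b []).length = 0 <;>
          by_cases h3 : x = a <;>
          by_cases h4 : x = a + 1 ∨ x = a - 1 <;>
          simp [pvPA, pvCell, h1, h2, h3, h4]),
      PySem.List.foldl_append_if]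
  rw [PySem.List.foldl_congr_mem' _ _
    (fun acc a => acc ++ ((PySem.List.pyRange 0 8 1).filter (pvPA x y field a)).map (fun b => [a, b])) []
    (by intro a _ acc; exact hinner a acc),
    PySem.List.foldl_append_eq_flatMap, List.nil_append]

theorem B_shape (x y : Int) (field : List (List (List Int))) (hy : 0 ≤ y + 1 ∧ y + 1 ≤ 7) :
    distant_range_alt x y field =
      ([x - 1, x, x + 1].filter (pvPB x y field)).map (fun a => [a, y + 1]) := by
  unfold distant_range_alt
  rw [if_neg (by simpa using hy)]
  rw [PySem.List.foldl_congr_mem' _ _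
    (fun acc a => if pvPB x y field a then acc ++ [[a, y + 1]] else acc) []
    (by
      intro a _ acc
      by_cases h3 : a = x
      · subst h3
        by_cases h1 : 0 ≤ a ∧ a ≤ 7 <;>
          by_cases h2 : (PySem.List.pyGetD (PySem.List.pyGetD field a []) (y + 1) []).length = 0 <;>
          simp [pvPB, pvCell, h1, h2]
      · by_cases h1 : 0 ≤ a ∧ a ≤ 7 <;>
          by_cases h2 : (PySem.List.pyGetD (PySem.List.pyGetD field a []) (y + 1) []).length = 0 <;>
          simp [pvPB, pvCell, h1, h2, h3]),
    PySem.List.foldl_append_if, List.nil_append]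

set_option maxHeartbeats 1600000 in
theorem main_eq (x y : Int) (field : List (List (List Int))) :
    distant_range x y field = distant_range_alt x y field := by
  rw [A_shape, pyRange8]
  by_cases hy : 0 ≤ y + 1 ∧ y + 1 ≤ 7
  · rw [B_shape x y field hy]
    obtain ⟨h1, h2⟩ := hy
    have h1' : -1 ≤ y := by omega
    have h2' : y ≤ 6 := by omega
    interval_cases y <;>
    · by_cases hx : -1 ≤ x ∧ x ≤ 8
      · obtain ⟨g1, g2⟩ := hx
        interval_cases x <;> simp [List.filter_cons, pvPA, pvPB, pvCell] <;>
          split_ifs <;> simp_all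
      · simp [List.filter_cons, pvPA, pvPB, pvCell,
          show x ≠ -1 by omega, show x ≠ 0 by omega, show x ≠ 1 by omega,
          show x ≠ 2 by omega, show x ≠ 3 by omega, show x ≠ 4 by omega,
          show x ≠ 5 by omega, show x ≠ 6 by omega, show x ≠ 7 by omega,
          show x ≠ 8 by omega, show ¬(0 ≤ x - 1 ∧ x - 1 ≤ 7) by omega,
          show ¬(0 ≤ x ∧ x ≤ 7) by omega, show ¬(0 ≤ x + 1 ∧ x + 1 ≤ 7) by omega] <;>
        split_ifs <;> simp_all <;> omega
  · unfold distant_range_alt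
    rw [if_pos (by omega)]
    simp [pvPA, show y ≠ -1 by omega, show y ≠ 0 by omega, show y ≠ 1 by omega,
      show y ≠ 2 by omega, show y ≠ 3 by omega, show y ≠ 4 by omega,
      show y ≠ 5 by omega, show y ≠ 6 by omega]

-- ===== VERDICT (by name: the statement is the Claim_ definition above) =====
theorem distant_range_spec : Claim_equal_distant_range := by
  intro x y field _ _
  unfold Spec_distant_range
  exact main_eq x y field
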